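-- pv_equiv track=rewrite | github.com/Raajaganeish/con-ai-assignment | app/segment.py | make_h1_ranges
-- ===== SOURCE A (Python) =====
-- from typing import List, Dict, Any, Tuple, Optional
--
-- def make_h1_ranges(h1_marks: List[Tuple[int, str]], num_pages: int) -> List[Tuple[str, int, int]]:
--     """
--     Convert H1 marks into [(title, start_page, end_page)].
--     Pages are 0-based here.
--     """
--     if not h1_marks:
--         return [("Document", 0, num_pages-1)]
--     # Deduplicate consecutive repeats of same title
--     dedup = []
--     last = None
--     for pidx, title in h1_marks:
--         if title != last:
--             dedup.append((pidx, title))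
--             last = title
--     ranges = []
--     for i, (p, title) in enumerate(dedup):
--         start = p
--         end = (dedup[i+1][0] - 1) if i+1 < len(dedup) else (num_pages - 1)
--         ranges.append((title.strip(), start, end))
--     return ranges
-- ===== SOURCE B (Python) =====
-- from typing import List, Tuple
--
-- def make_h1_ranges(h1_marks: List[Tuple[int, str]], num_pages: int) -> List[Tuple[str, int, int]]:
--     """Single fused pass: carry the current (start, title); close a range whenever
--     the title changes, and close the last one at num_pages - 1."""
--     if not h1_marks:
--         return [("Document", 0, num_pages - 1)]
--     (start, title) = h1_marks[0]
--     out = []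
--     for p, t in h1_marks[1:]:
--         if t != title:
--             out.append((title.strip(), start, p - 1))
--             start, title = p, t
--     out.append((title.strip(), start, num_pages - 1))
--     return out
-- ===== Notes on version B (the rewrite author's own statement) =====
-- stated objective: simpler
-- what changed: Replaces A's two sequential passes (build a dedup list, then pair each dedup entry with a lookahead index into it) by one fused pass that carries only the current (start, title) and emits a completed range the moment the title changes, so the intermediate dedup list and the indexed lookahead disappear.
import Mathlib
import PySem

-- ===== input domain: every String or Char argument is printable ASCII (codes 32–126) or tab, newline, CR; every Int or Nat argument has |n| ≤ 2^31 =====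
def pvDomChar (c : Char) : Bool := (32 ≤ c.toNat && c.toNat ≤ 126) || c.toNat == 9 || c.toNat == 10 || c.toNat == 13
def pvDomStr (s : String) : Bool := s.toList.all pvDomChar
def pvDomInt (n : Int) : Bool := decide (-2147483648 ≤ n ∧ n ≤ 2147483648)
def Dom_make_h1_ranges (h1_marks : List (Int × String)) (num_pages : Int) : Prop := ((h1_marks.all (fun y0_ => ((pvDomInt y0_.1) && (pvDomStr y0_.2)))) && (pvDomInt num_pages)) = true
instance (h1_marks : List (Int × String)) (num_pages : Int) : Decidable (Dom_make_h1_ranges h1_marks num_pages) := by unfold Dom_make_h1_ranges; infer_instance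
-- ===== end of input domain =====

-- B fuses A's two passes (dedup list + indexed lookahead) into one pass carrying
-- only the current (start, title); objective: simpler (same O(n) cost).

-- ===== PORT A =====
def make_h1_ranges (h1_marks : List (Int × String)) (num_pages : Int) : List (String × Int × Int) :=
  if h1_marks = [] then [("Document", 0, num_pages - 1)]
  else
    -- dedup pass: 'for pidx, title in h1_marks: if title != last: dedup.append(...); last = title'
    let dedup := (h1_marks.foldl
      (fun (acc : List (Int × String) × Option String) pt =>
        if some pt.2 ≠ acc.2 then (acc.1 ++ [pt], some pt.2) else acc)
      ([], none)).1
    -- ranges pass: 'for i, (p, title) in enumerate(dedup): ... dedup[i+1][0] - 1 ...'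
    (PySem.List.enumerate dedup).foldl
      (fun ranges ip =>
        ranges ++ [(PySem.Str.strip ip.2.2, ip.2.1,
          if ip.1 + 1 < (dedup.length : Int)
          then (PySem.List.pyGetD dedup (ip.1 + 1) (0, "")).1 - 1
          else num_pages - 1)]) []

-- ===== PORT B =====
-- fused loop: 'for p, t in h1_marks[1:]: if t != title: out.append(...); start, title = p, t'
def pvAltLoop (rest : List (Int × String)) (start : Int) (title : String) (num_pages : Int) :
    List (String × Int × Int) :=
  match rest with
  | [] => [(PySem.Str.strip title, start, num_pages - 1)]
  | (p, t) :: rs =>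
    if t ≠ title then (PySem.Str.strip title, start, p - 1) :: pvAltLoop rs p t num_pages
    else pvAltLoop rs start title num_pages

def make_h1_ranges_alt (h1_marks : List (Int × String)) (num_pages : Int) : List (String × Int × Int) :=
  match h1_marks with
  | [] => [("Document", 0, num_pages - 1)]
  | (p, t) :: rest => pvAltLoop rest p t num_pages

-- ===== PRECONDITION & SPEC =====
def Spec_make_h1_ranges (h1_marks : List (Int × String)) (num_pages : Int) (out : List (String × Int × Int)) : Prop := out = make_h1_ranges_alt h1_marks num_pages
instance (h1_marks : List (Int × String)) (num_pages : Int) (out : List (String × Int × Int)) : Decidable (Spec_make_h1_ranges h1_marks num_pages out) := by unfold Spec_make_h1_ranges; infer_instance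

-- ===== CLAIM (what is proved, stated in full; the proofs are below) =====
def Claim_equal_make_h1_ranges : Prop := ∀ (h1_marks : List (Int × String)) (num_pages : Int), Dom_make_h1_ranges h1_marks num_pages → Spec_make_h1_ranges h1_marks num_pages (make_h1_ranges h1_marks num_pages)

-- ===== LEMMAS AND PROOFS =====

-- dedup of the tail, given the last seen title
def pvDed (last : String) : List (Int × String) → List (Int × String)
  | [] => []
  | (p, t) :: rs => if t ≠ last then (p, t) :: pvDed t rs else pvDed last rs

-- last seen title after the dedup pass
def pvLast (last : String) : List (Int × String) → String
  | [] => last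
  | (_, t) :: rs => pvLast t rs

-- pair consecutive dedup entries into ranges
def pvPair (n : Int) : List (Int × String) → List (String × Int × Int)
  | [] => []
  | [(p, t)] => [(PySem.Str.strip t, p, n - 1)]
  | (p, t) :: (q, u) :: rs => (PySem.Str.strip t, p, q - 1) :: pvPair n ((q, u) :: rs)

lemma pvDed_foldl : ∀ (rest acc : List (Int × String)) (last : String),
    rest.foldl
      (fun (acc : List (Int × String) × Option String) pt =>
        if some pt.2 ≠ acc.2 then (acc.1 ++ [pt], some pt.2) else acc)
      (acc, some last)
    = (acc ++ pvDed last rest, some (pvLast last rest)) := by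
  intro rest
  induction rest with
  | nil => intro acc last; simp [pvDed, pvLast]
  | cons pt rs ih =>
    intro acc last
    obtain ⟨p, t⟩ := pt
    have hstep : (if some (p, t).2 ≠ ((acc, some last) : List (Int × String) × Option String).2
          then ((acc, some last).1 ++ [(p, t)], some (p, t).2) else (acc, some last))
        = if t = last then ((acc, some last) : List (Int × String) × Option String)
          else (acc ++ [(p, t)], some t) := by
      by_cases h : t = last <;> simp [h]
    rw [List.foldl_cons, hstep]
    by_cases h : t = last
    · subst h
      rw [if_pos rfl, ih]
      simp [pvDed, pvLast]
    · rw [if_neg h, ih]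
      simp [pvDed, pvLast, h, List.append_assoc]

lemma pvAltLoop_eq_pvPair : ∀ (rest : List (Int × String)) (start : Int) (title : String) (n : Int),
    pvAltLoop rest start title n = pvPair n ((start, title) :: pvDed title rest) := by
  intro rest
  induction rest with
  | nil => intro start title n; simp [pvAltLoop, pvDed, pvPair]
  | cons pt rs ih =>
    intro start title n
    obtain ⟨p, t⟩ := pt
    by_cases h : t = title
    · subst h; simp [pvAltLoop, pvDed, ih]
    · simp only [pvAltLoop, pvDed, if_pos h]
      rw [ih]
      rfl

lemma pvRanges_eq_pvPair_aux (n : Int) : ∀ (suf pre : List (Int × String)),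
    (PySem.List.enumerate suf (pre.length : Int)).map
      (fun ip => (PySem.Str.strip ip.2.2, ip.2.1,
        if ip.1 + 1 < (((pre ++ suf).length : Nat) : Int)
        then (PySem.List.pyGetD (pre ++ suf) (ip.1 + 1) (0, "")).1 - 1
        else n - 1))
    = pvPair n suf := by
  intro suf
  induction suf with
  | nil => intro pre; simp [PySem.List.enumerate_nil, pvPair]
  | cons pt rs ih =>
    intro pre
    obtain ⟨p, t⟩ := pt
    rw [PySem.List.enumerate_cons, List.map_cons]
    have htail :
        (PySem.List.enumerate rs ((pre.length : Int) + 1)).map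
          (fun ip => (PySem.Str.strip ip.2.2, ip.2.1,
            if ip.1 + 1 < (((pre ++ (p, t) :: rs).length : Nat) : Int)
            then (PySem.List.pyGetD (pre ++ (p, t) :: rs) (ip.1 + 1) (0, "")).1 - 1
            else n - 1))
        = pvPair n rs := by
      have h1 : pre ++ (p, t) :: rs = (pre ++ [(p, t)]) ++ rs := by simp
      have h2 : (pre.length : Int) + 1 = ((pre ++ [(p, t)]).length : Int) := by
        simp
      rw [h1, h2, ih (pre ++ [(p, t)])]
    rw [htail]
    match rs with
    | [] =>
      have hcond : ¬ ((pre.length : Int) + 1 < (((pre ++ [(p, t)]).length : Nat) : Int)) := by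
        simp
      simp only [hcond, if_neg, not_false_iff]
      simp [pvPair]
    | (q, u) :: rs' =>
      have hcond : (pre.length : Int) + 1 < (((pre ++ (p, t) :: (q, u) :: rs').length : Nat) : Int) := by
        push_cast [List.length_append, List.length_cons]
        omega
      have hget : (PySem.List.pyGetD (pre ++ (p, t) :: (q, u) :: rs') ((pre.length : Int) + 1) (0, "")) = (q, u) := by
        have : (pre.length : Int) + 1 = ((pre.length + 1 : Nat) : Int) := by push_cast; ring
        rw [this, PySem.List.pyGetD_natCast]
        rw [List.getD_eq_getElem?_getD, List.getElem?_append_right (by omega)]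
        simp
      rw [if_pos hcond, hget]
      simp [pvPair]

-- ===== VERDICT (by name: the statement is the Claim_ definition above) =====
theorem make_h1_ranges_spec : Claim_equal_make_h1_ranges := by
  unfold Claim_equal_make_h1_ranges Spec_make_h1_ranges
  intro h1_marks num_pages _
  match h1_marks with
  | [] => rfl
  | (p, t) :: rest =>
    show make_h1_ranges ((p, t) :: rest) num_pages = pvAltLoop rest p t num_pages
    unfold make_h1_ranges
    rw [if_neg (by simp)]
    have hded : ((p, t) :: rest).foldl
        (fun (acc : List (Int × String) × Option String) pt =>
          if some pt.2 ≠ acc.2 then (acc.1 ++ [pt], some pt.2) else acc)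
        ([], none)
        = ((p, t) :: pvDed t rest, some (pvLast t rest)) := by
      rw [List.foldl_cons]
      rw [if_pos (by simp)]
      simpa using pvDed_foldl rest [(p, t)] t
    simp only [hded]
    rw [PySem.List.foldl_append_singleton_eq_map, List.nil_append]
    have := pvRanges_eq_pvPair_aux num_pages ((p, t) :: pvDed t rest) []
    simp only [List.length_nil, Nat.cast_zero, List.nil_append] at this
    rw [this]
    exact (pvAltLoop_eq_pvPair rest p t num_pages).symm
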